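-- pv_equiv track=rewrite | github.com/pyCobs/scenario_basV2 | util.py | decaler
-- ===== SOURCE A (Python) =====
-- def decaler(list_valeur, decalage):
--     nb_annees = 10
--     list_valeur_decalees = []
--     somme = 0
--
--     if decalage >= 0:
--         for annee in range(0, nb_annees):
--             if annee < decalage:
--                 list_valeur_decalees.append(0)
--                 somme += int(list_valeur[nb_annees - annee - 1])
--             else:
--                 list_valeur_decalees.append(list_valeur[annee - decalage])
--         list_valeur_decalees[-1] = int(list_valeur_decalees[-1]) + somme
--
--     else:  # décalages négatifs
--         for annee in range(0, nb_annees):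
--             if annee > (nb_annees + decalage - 1):
--                 list_valeur_decalees.append(0)
--             else:
--                 list_valeur_decalees.append(str(list_valeur[annee - decalage]))
--
--     list_valeur_decalees = [str(x) for x in list_valeur_decalees]
--
--     return list_valeur_decalees
-- ===== SOURCE B (Python) =====
-- def decaler(list_valeur, decalage):
--     if decalage >= 0:
--         k = min(decalage, 10)
--         somme = sum(int(list_valeur[9 - i]) for i in range(k))
--         shifted = [0] * k + list(list_valeur[:10 - k])
--         last = int(shifted[9]) + somme
--         return [str(x) for x in shifted[:9]] + [str(last)]
--     else:
--         kept = [str(x) for x in list_valeur[-decalage:10]]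
--         return kept + ["0"] * (10 - len(kept))
-- ===== Notes on version B (the rewrite author's own statement) =====
-- stated objective: simpler
-- what changed: B replaces A's single indexed loop that threads a mixed int/str list and a running sum (then patches the last cell in place) by direct slice construction: zeros + a prefix slice for the shifted list, a separate sum over the wrapped-off top elements added to the last cell, and for negative shifts a slice padded with zeros.
import Mathlib
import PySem

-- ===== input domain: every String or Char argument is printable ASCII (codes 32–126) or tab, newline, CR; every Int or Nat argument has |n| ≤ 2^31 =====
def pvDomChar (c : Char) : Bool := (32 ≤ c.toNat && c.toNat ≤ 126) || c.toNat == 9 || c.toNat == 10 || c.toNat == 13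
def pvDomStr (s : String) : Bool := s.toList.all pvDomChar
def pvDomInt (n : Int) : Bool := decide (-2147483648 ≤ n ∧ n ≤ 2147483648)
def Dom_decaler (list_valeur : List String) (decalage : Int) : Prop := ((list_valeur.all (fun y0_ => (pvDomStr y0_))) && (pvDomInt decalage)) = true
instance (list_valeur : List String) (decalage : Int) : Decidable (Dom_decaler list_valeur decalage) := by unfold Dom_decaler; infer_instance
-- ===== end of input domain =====

-- B rebuilds the shifted list by slicing plus one separate sum of the wrapped-off elements,
-- instead of A's single indexed loop threading a mixed int/str list and a running sum (objective: simpler).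

-- A Python cell of the intermediate list: either the int 0 or a string.
inductive PyVal
  | intV : Int → PyVal
  | strV : String → PyVal
deriving DecidableEq

-- int(s) for a string; exact under Pre_, which guarantees parseability wherever int() is applied
def pyIntOfStrD (s : String) : Int := (PySem.Int.ofStr? s).getD 0

-- Python int(x) on a cell
def pyValInt : PyVal → Int
  | .intV n => n
  | .strV s => pyIntOfStrD s

-- Python str(x) on a cell
def pyValStr : PyVal → String
  | .intV n => PySem.Int.toStr n
  | .strV s => s

-- ===== PORT A =====
def decaler (list_valeur : List String) (decalage : Int) : List String :=
  if decalage ≥ 0 then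
    -- for annee in range(0, 10): append 0 and accumulate somme, or append list_valeur[annee - decalage]
    let st := (PySem.List.pyRange 0 10 1).foldl (fun (st : List PyVal × Int) annee =>
      if annee < decalage then
        (st.1 ++ [PyVal.intV 0], st.2 + pyIntOfStrD (PySem.List.pyGetD list_valeur (10 - annee - 1) ""))
      else
        (st.1 ++ [PyVal.strV (PySem.List.pyGetD list_valeur (annee - decalage) "")], st.2)) ([], 0)
    -- list_valeur_decalees[-1] = int(list_valeur_decalees[-1]) + somme
    let l := st.1.dropLast ++ [PyVal.intV (pyValInt (PySem.List.pyGetD st.1 (-1) (PyVal.intV 0)) + st.2)]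
    l.map pyValStr
  else
    -- for annee in range(0, 10): append 0 past the kept prefix, else str(list_valeur[annee - decalage])
    let l := (PySem.List.pyRange 0 10 1).foldl (fun (acc : List PyVal) annee =>
      if annee > 10 + decalage - 1 then
        acc ++ [PyVal.intV 0]
      else
        acc ++ [PyVal.strV (PySem.List.pyGetD list_valeur (annee - decalage) "")]) []
    l.map pyValStr

-- ===== PORT B =====
def decaler_alt (list_valeur : List String) (decalage : Int) : List String :=
  if decalage ≥ 0 then
    let k : Int := min decalage 10
    -- somme = sum(int(list_valeur[9 - i]) for i in range(k))
    let somme := ((PySem.List.pyRange 0 k 1).map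
      (fun i => pyIntOfStrD (PySem.List.pyGetD list_valeur (9 - i) ""))).sum
    -- shifted = [0] * k + list(list_valeur[:10 - k])
    let shifted : List PyVal :=
      List.replicate k.toNat (PyVal.intV 0) ++ (PySem.List.slice list_valeur none (some (10 - k))).map PyVal.strV
    -- last = int(shifted[9]) + somme
    let last := pyValInt (PySem.List.pyGetD shifted 9 (PyVal.intV 0)) + somme
    -- [str(x) for x in shifted[:9]] + [str(last)]
    ((PySem.List.slice shifted none (some 9)).map pyValStr) ++ [PySem.Int.toStr last]
  else
    -- kept = [str(x) for x in list_valeur[-decalage:10]]  (str is the identity on these strings)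
    let kept := PySem.List.slice list_valeur (some (-decalage)) (some 10)
    kept ++ List.replicate (10 - kept.length) "0"

-- ===== PRECONDITION & SPEC =====
-- Pre_ excludes exactly the inputs where A raises: IndexError when the list has fewer than 10
-- elements (except when decalage ≤ -10, where A reads no element), and ValueError where A applies
-- int() to a non-integer string (the min(decalage,10) wrapped-off top elements and, for
-- 0 ≤ decalage < 10, the final cell list_valeur[9 - decalage]).
def Pre_decaler (list_valeur : List String) (decalage : Int) : Prop :=
  (10 ≤ list_valeur.length ∨ decalage ≤ -10) ∧
  (0 ≤ decalage →
    (∀ i ∈ List.range (min decalage 10).toNat,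
        (PySem.Int.ofStr? (list_valeur.getD (9 - i) "")).isSome = true) ∧
    (decalage < 10 →
        (PySem.Int.ofStr? (list_valeur.getD (9 - decalage).toNat "")).isSome = true))
instance (list_valeur : List String) (decalage : Int) : Decidable (Pre_decaler list_valeur decalage) := by unfold Pre_decaler; infer_instance

def pvWitness_decaler : List String × Int := (["0", "1", "2", "3", "4", "5", "6", "7", "8", "9"], 2)

def Spec_decaler (list_valeur : List String) (decalage : Int) (out : List String) : Prop := out = decaler_alt list_valeur decalage
instance (list_valeur : List String) (decalage : Int) (out : List String) : Decidable (Spec_decaler list_valeur decalage out) := by unfold Spec_decaler; infer_instance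

-- ===== CLAIM (what is proved, stated in full; the proofs are below) =====
def Claim_equal_decaler : Prop := ∀ (list_valeur : List String) (decalage : Int), Dom_decaler list_valeur decalage → Pre_decaler list_valeur decalage → Spec_decaler list_valeur decalage (decaler list_valeur decalage)

-- ===== LEMMAS AND PROOFS =====
lemma dest10 (lv : List String) (h : 10 ≤ lv.length) :
    ∃ a0 a1 a2 a3 a4 a5 a6 a7 a8 a9 rest,
      lv = a0 :: a1 :: a2 :: a3 :: a4 :: a5 :: a6 :: a7 :: a8 :: a9 :: rest := by
  match lv, h with
  | a0 :: a1 :: a2 :: a3 :: a4 :: a5 :: a6 :: a7 :: a8 :: a9 :: rest, _ =>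
    exact ⟨a0, a1, a2, a3, a4, a5, a6, a7, a8, a9, rest, rfl⟩

-- ===== VERDICT (by name: the statement is the Claim_ definition above) =====
set_option maxHeartbeats 4000000 in
theorem decaler_spec : Claim_equal_decaler := by
  intro lv d hDom hPre
  unfold Spec_decaler
  obtain ⟨hlen, _⟩ := hPre
  rcases le_or_gt 0 d with hd | hd
  · have h10 : 10 ≤ lv.length := by omega
    obtain ⟨a0, a1, a2, a3, a4, a5, a6, a7, a8, a9, rest, rfl⟩ := dest10 lv h10
    rcases lt_or_ge d 10 with hdl | hdg
    · interval_cases d <;>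
        simp [decaler, decaler_alt, PySem.List.pyRange_one_cons, PySem.List.pyGetD_ofNat',
          PySem.List.slice_to, List.replicate, pyValInt, pyValStr,
          List.getLast, PySem.List.pyGetD_neg_one] <;>
        (congr 1; ring)
    · simp [decaler, decaler_alt, PySem.List.pyRange_one_cons, PySem.List.pyGetD_ofNat',
        PySem.List.slice_to, List.replicate, pyValInt, pyValStr,
        List.getLast, PySem.List.pyGetD_neg_one,
        show (0:Int) ≤ d from by omega,
        show (0:Int) < d from by omega, show (1:Int) < d from by omega,
        show (2:Int) < d from by omega, show (3:Int) < d from by omega,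
        show (4:Int) < d from by omega, show (5:Int) < d from by omega,
        show (6:Int) < d from by omega, show (7:Int) < d from by omega,
        show (8:Int) < d from by omega, show (9:Int) < d from by omega,
        show min d 10 = 10 from by omega]
      congr 1
      ring
  · rcases le_or_gt d (-10) with hdl | hdg
    · have hsl : PySem.List.slice lv (some (-d)) (some 10) = [] := by
        rw [PySem.List.slice_toNat _ (by omega) (by omega)]
        simp
        omega
      simp [decaler, decaler_alt, PySem.List.pyRange_one_cons,
        hsl, List.replicate, pyValStr,
        show ¬ (0:Int) ≤ d from by omega,
        show 10 + d ≤ 0 from by omega,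
        show 10 + d ≤ 1 from by omega,
        show 10 + d ≤ 2 from by omega,
        show 10 + d ≤ 3 from by omega,
        show 10 + d ≤ 4 from by omega,
        show 10 + d ≤ 5 from by omega,
        show 10 + d ≤ 6 from by omega,
        show 10 + d ≤ 7 from by omega,
        show 10 + d ≤ 8 from by omega,
        show 10 + d ≤ 9 from by omega,
        show PySem.Int.toStr 0 = "0" from by decide]
    · have h10 : 10 ≤ lv.length := by omega
      obtain ⟨a0, a1, a2, a3, a4, a5, a6, a7, a8, a9, rest, rfl⟩ := dest10 lv h10
      interval_cases d <;>
        simp [decaler, decaler_alt, PySem.List.pyRange_one_cons, PySem.List.pyGetD_ofNat',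
          PySem.List.slice_toNat, List.replicate, pyValStr,
          show PySem.Int.toStr 0 = "0" from by decide]
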